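-- pv_equiv track=rewrite | github.com/kmj00204/baekjun | week01/2628.py | best_land
-- ===== SOURCE A (Python) =====
-- def best_land(arr):
--     rows = len(arr)
--     cols = len(arr[0])
--
--     visited = [[False for _ in range(cols)] for _ in range(rows)]
--
--     def dfs(r, c):
--
--         if r < 0 or r >= rows or c < 0 or c >= cols:
--             return 0
--
--         if visited[r][c] or arr[r][c] == "X":
--             return 0
--
--         visited[r][c] = True
--         size = 1
--
--         size += dfs(r + 1, c)
--         size += dfs(r - 1, c)
--         size += dfs(r, c + 1)
--         size += dfs(r, c - 1)
--         return size
--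
--     max_size = 0
--     for i in range(rows):
--         for j in range(cols):
--             if arr[i][j] == "O" and not visited[i][j]:
--                 max_size = max(max_size, dfs(i, j))
--
--     return max_size
-- ===== SOURCE B (Python) =====
-- def best_land(arr):
--     rows = len(arr)
--     cols = len(arr[0])
--
--     seen = [False] * (rows * cols)
--
--     best = 0
--     for k in range(rows * cols):
--         if arr[k // cols][k % cols] == "O" and not seen[k]:
--             size = 0
--             stack = [(k // cols, k % cols)]
--             while stack:
--                 r, c = stack.pop()
--                 if (0 <= r < rows and 0 <= c < cols
--                         and not seen[r * cols + c] and arr[r][c] != "X"):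
--                     seen[r * cols + c] = True
--                     size += 1
--                     # pushed so that (r+1, c) is popped first
--                     stack.extend([(r, c - 1), (r, c + 1), (r - 1, c), (r + 1, c)])
--             if size > best:
--                 best = size
--     return best
-- ===== Notes on version B (the rewrite author's own statement) =====
-- stated objective: alternative
-- what changed: Replaces the recursive per-cell DFS over a 2-D visited matrix by a single flat scan over cell numbers 0..rows*cols-1 with an explicit-stack flood fill and a 1-D seen array indexed by r*cols+c.
import Mathlib
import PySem

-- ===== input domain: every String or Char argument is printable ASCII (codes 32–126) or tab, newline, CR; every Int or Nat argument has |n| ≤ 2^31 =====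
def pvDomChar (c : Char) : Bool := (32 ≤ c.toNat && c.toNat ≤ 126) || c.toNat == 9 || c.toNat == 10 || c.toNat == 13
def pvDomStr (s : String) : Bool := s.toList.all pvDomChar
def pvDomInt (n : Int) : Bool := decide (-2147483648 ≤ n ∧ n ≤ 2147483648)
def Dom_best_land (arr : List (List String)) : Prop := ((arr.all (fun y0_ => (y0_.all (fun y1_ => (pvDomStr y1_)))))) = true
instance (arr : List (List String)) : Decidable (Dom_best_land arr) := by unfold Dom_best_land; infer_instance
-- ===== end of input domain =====

-- B replaces A's recursive DFS over a 2-D visited matrix by a single flat scan over cell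
-- indices 0..rows*cols with an explicit-stack flood fill and a 1-D seen array (alternative
-- decomposition, same cost).


-- ===== PORT A =====
-- cell accessors for A: indices are only read after the 0 ≤ r < rows / 0 ≤ c < cols bounds
-- check (the scan indices come from range), so `.toNat` indexing is exact here.
def pvAget (arr : List (List String)) (r c : Int) : String := (arr.getD r.toNat []).getD c.toNat ""
def pvVget (v : List (List Bool)) (r c : Int) : Bool := (v.getD r.toNat []).getD c.toNat false
def pvVset (v : List (List Bool)) (r c : Int) : List (List Bool) :=
  v.set r.toNat ((v.getD r.toNat []).set c.toNat true)
-- number of unvisited entries; used as the fuel bound for A's recursion below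
def pvUnvis (v : List (List Bool)) : Nat := (v.map (fun row => row.count false)).sum

-- A's recursive dfs; `fuel` is the standard totality idiom (every call below supplies
-- fuel > pvUnvis v, which bounds the recursion depth, so the 0-fuel branch is never taken).
def pvDfs (arr : List (List String)) (rows cols : Int) :
    Nat → Int → Int → List (List Bool) → Int × List (List Bool)
  | 0, _, _, v => (0, v)
  | f+1, r, c, v =>
    if r < 0 ∨ rows ≤ r ∨ c < 0 ∨ cols ≤ c then (0, v)
    else if pvVget v r c || pvAget arr r c == "X" then (0, v)
    else
      let v1 := pvVset v r c
      let p1 := pvDfs arr rows cols f (r+1) c v1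
      let p2 := pvDfs arr rows cols f (r-1) c p1.2
      let p3 := pvDfs arr rows cols f r (c+1) p2.2
      let p4 := pvDfs arr rows cols f r (c-1) p3.2
      (1 + p1.1 + p2.1 + p3.1 + p4.1, p4.2)

-- body of A's inner `for j` loop
def pvCellA (arr : List (List String)) (rows cols : Int) (i : Int)
    (st : Int × List (List Bool)) (j : Int) : Int × List (List Bool) :=
  if pvAget arr i j == "O" && !(pvVget st.2 i j) then
    let p := pvDfs arr rows cols (pvUnvis st.2 + 1) i j st.2
    (max st.1 p.1, p.2)
  else st

def pvRowA (arr : List (List String)) (rows cols : Int)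
    (st : Int × List (List Bool)) (i : Int) : Int × List (List Bool) :=
  (PySem.List.pyRange 0 cols 1).foldl (pvCellA arr rows cols i) st

def best_land (arr : List (List String)) : Int :=
  let rows : Int := arr.length
  let cols : Int := (PySem.List.pyGetD arr 0 []).length   -- arr[0]; IndexError on [] excluded by Pre_
  let v0 := List.replicate rows.toNat (List.replicate cols.toNat false)
  ((PySem.List.pyRange 0 rows 1).foldl (pvRowA arr rows cols) ((0 : Int), v0)).1

-- ===== PORT B =====
-- B's state: one flat `seen` list over cell numbers k = r*cols + c.
def pvSeenGet (s : List Bool) (t : Int) : Bool := s.getD t.toNat false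
def pvSeenSet (s : List Bool) (t : Int) : List Bool := s.set t.toNat true
def pvFree (s : List Bool) : Nat := s.count false

-- Source B's `while stack:` loop; list head = top of the Python stack (pop() takes the head; the
-- reversed extend puts (r+1,c) on top).  `fuel` is the totality idiom: each iteration pops one
-- entry and pushes 4 only when it marks a cell, so fuel ≥ stack.length + 4*pvFree s never runs out.
def pvFill (arr : List (List String)) (rows cols : Int) :
    Nat → List Bool → List (Int × Int) → Int × List Bool
  | _, s, [] => (0, s)
  | 0, s, _ :: _ => (0, s)
  | f+1, s, (r, c) :: rest =>
    if 0 ≤ r ∧ r < rows ∧ 0 ≤ c ∧ c < cols ∧ pvSeenGet s (r * cols + c) = false ∧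
        (arr.getD r.toNat []).getD c.toNat "" ≠ "X" then
      let p := pvFill arr rows cols f (pvSeenSet s (r * cols + c))
                 ((r+1,c) :: (r-1,c) :: (r,c+1) :: (r,c-1) :: rest)
      (1 + p.1, p.2)
    else pvFill arr rows cols f s rest

-- body of Source B's single `for k` loop (k // cols, k % cols are Python floor division/modulo)
def pvStepB (arr : List (List String)) (rows cols : Int)
    (st : Int × List Bool) (k : Int) : Int × List Bool :=
  if (arr.getD (PySem.Int.floordiv k cols).toNat []).getD (PySem.Int.mod k cols).toNat "" == "O"
      && !(pvSeenGet st.2 k) then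
    let p := pvFill arr rows cols (4 * pvFree st.2 + 1) st.2
               [(PySem.Int.floordiv k cols, PySem.Int.mod k cols)]
    (if p.1 > st.1 then p.1 else st.1, p.2)
  else st

def best_land_alt (arr : List (List String)) : Int :=
  let rows : Int := arr.length
  let cols : Int := (PySem.List.pyGetD arr 0 []).length
  ((PySem.List.pyRange 0 (rows * cols) 1).foldl (pvStepB arr rows cols)
    ((0 : Int), List.replicate (rows * cols).toNat false)).1

-- ===== PRECONDITION & SPEC =====
-- Pre_ excludes exactly the inputs where Python A raises an IndexError: the empty grid (arr[0])
-- and grids having a row shorter than the first row (arr[i][j] in the scan).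
def Pre_best_land (arr : List (List String)) : Prop :=
  arr ≠ [] ∧ ∀ row ∈ arr, arr.headI.length ≤ row.length
instance (arr : List (List String)) : Decidable (Pre_best_land arr) := by
  unfold Pre_best_land; infer_instance
def pvWitness_best_land : List (List String) := [["O", "X"], ["O", "O"]]

def Spec_best_land (arr : List (List String)) (out : Int) : Prop := out = best_land_alt arr
instance (arr : List (List String)) (out : Int) : Decidable (Spec_best_land arr out) := by
  unfold Spec_best_land; infer_instance

-- ===== CLAIM (what is proved, stated in full; the proofs are below) =====
def Claim_equal_best_land : Prop :=
  ∀ (arr : List (List String)), Dom_best_land arr → Pre_best_land arr →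
    Spec_best_land arr (best_land arr)

-- ===== LEMMAS AND PROOFS =====

-- A's visited grid keeps its rows×cols shape
def pvShape (rows cols : Int) (v : List (List Bool)) : Prop :=
  v.length = rows.toNat ∧ ∀ row ∈ v, row.length = cols.toNat

theorem pvShape_vset (rows cols : Int) (v : List (List Bool)) (r c : Int)
    (h : pvShape rows cols v) : pvShape rows cols (pvVset v r c) := by
  by_cases hr : r.toNat < v.length
  · obtain ⟨h1, h2⟩ := h
    refine ⟨by simp [pvVset, h1], ?_⟩
    intro row hrow
    rcases List.mem_or_eq_of_mem_set hrow with h' | h'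
    · exact h2 _ h'
    · subst h'
      rw [List.length_set]
      exact h2 _ (List.getD_eq_getElem v [] hr ▸ List.getElem_mem hr)
  · unfold pvVset
    rw [List.set_eq_of_length_le (by omega)]
    exact h

theorem pvCount_set_le (l : List Bool) (n : Nat) :
    (l.set n true).count false ≤ l.count false := by
  induction l generalizing n with
  | nil => simp
  | cons a l ih =>
    cases n with
    | zero => cases a <;> simp [List.count_cons]
    | succ n =>
      have := ih n
      simp only [List.set, List.count_cons]
      omega

theorem pvCount_set_lt (l : List Bool) (n : Nat) (hn : n < l.length)
    (hf : l.getD n false = false) : (l.set n true).count false < l.count false := by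
  induction l generalizing n with
  | nil => simp at hn
  | cons a l ih =>
    cases n with
    | zero =>
      simp only [List.getD_cons_zero] at hf
      subst hf
      simp [List.count_cons]
    | succ n =>
      simp only [List.getD_cons_succ] at hf
      have := ih n (by simpa using hn) hf
      simp only [List.set, List.count_cons]
      omega

theorem pvUnvis_cons (row : List Bool) (v : List (List Bool)) :
    pvUnvis (row :: v) = row.count false + pvUnvis v := by
  simp [pvUnvis]

theorem pvUnvis_set_le : ∀ (v : List (List Bool)) (n : Nat) (row' : List Bool),
    row'.count false ≤ (v.getD n []).count false → pvUnvis (v.set n row') ≤ pvUnvis v := by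
  intro v
  induction v with
  | nil => intro n row' _; simp
  | cons row v ih =>
    intro n row' h
    cases n with
    | zero =>
      simp only [List.getD_cons_zero] at h
      simp only [List.set, pvUnvis_cons]
      omega
    | succ n =>
      simp only [List.getD_cons_succ] at h
      have := ih n row' h
      simp only [List.set, pvUnvis_cons]
      omega

theorem pvUnvis_set_lt : ∀ (v : List (List Bool)) (n : Nat) (row' : List Bool),
    n < v.length → row'.count false < (v.getD n []).count false →
    pvUnvis (v.set n row') < pvUnvis v := by
  intro v
  induction v with
  | nil => intro n row' hn _; simp at hn
  | cons row v ih =>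
    intro n row' hn h
    cases n with
    | zero =>
      simp only [List.getD_cons_zero] at h
      simp only [List.set, pvUnvis_cons]
      omega
    | succ n =>
      simp only [List.getD_cons_succ] at h
      have := ih n row' (by simpa using hn) h
      simp only [List.set, pvUnvis_cons]
      omega

theorem pvUnvis_vset_le (v : List (List Bool)) (r c : Int) :
    pvUnvis (pvVset v r c) ≤ pvUnvis v :=
  pvUnvis_set_le v r.toNat _ (pvCount_set_le _ _)

theorem pvUnvis_vset_lt (v : List (List Bool)) (r c : Int)
    (hr : r.toNat < v.length) (hc : c.toNat < (v.getD r.toNat []).length)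
    (hf : pvVget v r c = false) : pvUnvis (pvVset v r c) < pvUnvis v :=
  pvUnvis_set_lt v r.toNat _ hr (pvCount_set_lt _ _ hc hf)

theorem pvDfs_unvis_le (arr : List (List String)) (rows cols : Int) :
    ∀ (f : Nat) (r c : Int) (v : List (List Bool)),
      pvUnvis (pvDfs arr rows cols f r c v).2 ≤ pvUnvis v := by
  intro f
  induction f with
  | zero => intro r c v; simp [pvDfs]
  | succ f ih =>
    intro r c v
    simp only [pvDfs]
    split_ifs with h1 h2
    · simp
    · simp
    · exact le_trans (ih _ _ _) (le_trans (ih _ _ _)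
        (le_trans (ih _ _ _) (le_trans (ih _ _ _) (pvUnvis_vset_le v r c))))

theorem pvDfs_shape (arr : List (List String)) (rows cols : Int) :
    ∀ (f : Nat) (r c : Int) (v : List (List Bool)),
      pvShape rows cols v → pvShape rows cols (pvDfs arr rows cols f r c v).2 := by
  intro f
  induction f with
  | zero => intro r c v h; simpa [pvDfs] using h
  | succ f ih =>
    intro r c v h
    simp only [pvDfs]
    split_ifs with h1 h2
    · exact h
    · exact h
    · exact ih _ _ _ (ih _ _ _ (ih _ _ _ (ih _ _ _ (pvShape_vset rows cols v r c h))))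

-- in-range facts extracted from the guards under the shape invariant
theorem pvInRange_row (rows cols : Int) (v : List (List Bool)) (r : Int)
    (hs : pvShape rows cols v) (h0 : 0 ≤ r) (h1 : r < rows) : r.toNat < v.length := by
  obtain ⟨hl, _⟩ := hs; omega

theorem pvInRange_col (rows cols : Int) (v : List (List Bool)) (r c : Int)
    (hs : pvShape rows cols v) (h0 : 0 ≤ r) (h1 : r < rows) (h2 : 0 ≤ c) (h3 : c < cols) :
    c.toNat < (v.getD r.toNat []).length := by
  obtain ⟨hl, hrows⟩ := hs
  have hr : r.toNat < v.length := by omega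
  have := hrows _ (List.getD_eq_getElem v [] hr ▸ List.getElem_mem hr)
  omega

theorem pvDfs_fuel (arr : List (List String)) (rows cols : Int) :
    ∀ (f g : Nat) (r c : Int) (v : List (List Bool)), pvShape rows cols v →
      pvUnvis v < f → pvUnvis v < g →
      pvDfs arr rows cols f r c v = pvDfs arr rows cols g r c v := by
  intro f
  induction f with
  | zero => intro g r c v _ hf _; omega
  | succ f ih =>
    intro g r c v hs hf hg
    cases g with
    | zero => omega
    | succ g =>
      simp only [pvDfs]
      split_ifs with h1 h2
      · rfl
      · rfl
      · have hb : 0 ≤ r ∧ r < rows ∧ 0 ≤ c ∧ c < cols := by push_neg at h1; omega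
        simp only [Bool.or_eq_true, not_or, Bool.not_eq_true, beq_iff_eq] at h2
        obtain ⟨hvg, hX⟩ := h2
        have hrl := pvInRange_row rows cols v r hs hb.1 hb.2.1
        have hcl := pvInRange_col rows cols v r c hs hb.1 hb.2.1 hb.2.2.1 hb.2.2.2
        have hlt := pvUnvis_vset_lt v r c hrl hcl hvg
        have hs1 := pvShape_vset rows cols v r c hs
        have e1 : pvDfs arr rows cols f (r+1) c (pvVset v r c)
            = pvDfs arr rows cols g (r+1) c (pvVset v r c) :=
          ih g _ _ _ hs1 (by omega) (by omega)
        rw [e1]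
        have hs2 := pvDfs_shape arr rows cols g (r+1) c _ hs1
        have hu2 := pvDfs_unvis_le arr rows cols g (r+1) c (pvVset v r c)
        have e2 : pvDfs arr rows cols f (r-1) c (pvDfs arr rows cols g (r+1) c (pvVset v r c)).2
            = pvDfs arr rows cols g (r-1) c (pvDfs arr rows cols g (r+1) c (pvVset v r c)).2 :=
          ih g _ _ _ hs2 (by omega) (by omega)
        rw [e2]
        have hs3 := pvDfs_shape arr rows cols g (r-1) c _ hs2
        have hu3 := pvDfs_unvis_le arr rows cols g (r-1) c
          (pvDfs arr rows cols g (r+1) c (pvVset v r c)).2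
        have e3 : pvDfs arr rows cols f r (c+1)
              (pvDfs arr rows cols g (r-1) c (pvDfs arr rows cols g (r+1) c (pvVset v r c)).2).2
            = pvDfs arr rows cols g r (c+1)
              (pvDfs arr rows cols g (r-1) c (pvDfs arr rows cols g (r+1) c (pvVset v r c)).2).2 :=
          ih g _ _ _ hs3 (by omega) (by omega)
        rw [e3]
        have hs4 := pvDfs_shape arr rows cols g r (c+1) _ hs3
        have hu4 := pvDfs_unvis_le arr rows cols g r (c+1)
          (pvDfs arr rows cols g (r-1) c (pvDfs arr rows cols g (r+1) c (pvVset v r c)).2).2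
        have e4 : pvDfs arr rows cols f r (c-1)
              (pvDfs arr rows cols g r (c+1) (pvDfs arr rows cols g (r-1) c
                (pvDfs arr rows cols g (r+1) c (pvVset v r c)).2).2).2
            = pvDfs arr rows cols g r (c-1)
              (pvDfs arr rows cols g r (c+1) (pvDfs arr rows cols g (r-1) c
                (pvDfs arr rows cols g (r+1) c (pvVset v r c)).2).2).2 :=
          ih g _ _ _ hs4 (by omega) (by omega)
        rw [e4]

-- canonical sequential form of A's dfs over a worklist
def pvSeq (arr : List (List String)) (rows cols : Int) :
    List (Int × Int) → List (List Bool) → Int × List (List Bool)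
  | [], v => (0, v)
  | (r, c) :: rest, v =>
    let p := pvDfs arr rows cols (pvUnvis v + 1) r c v
    let q := pvSeq arr rows cols rest p.2
    (p.1 + q.1, q.2)

theorem pvSeq_nil (arr : List (List String)) (rows cols : Int) (v : List (List Bool)) :
    pvSeq arr rows cols [] v = (0, v) := rfl

theorem pvSeq_cons (arr : List (List String)) (rows cols : Int) (r c : Int)
    (rest : List (Int × Int)) (v : List (List Bool)) :
    pvSeq arr rows cols ((r, c) :: rest) v =
      ((pvDfs arr rows cols (pvUnvis v + 1) r c v).1 +
         (pvSeq arr rows cols rest (pvDfs arr rows cols (pvUnvis v + 1) r c v).2).1,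
       (pvSeq arr rows cols rest (pvDfs arr rows cols (pvUnvis v + 1) r c v).2).2) := rfl

theorem pvDfs_good (arr : List (List String)) (rows cols : Int) (f : Nat) (r c : Int)
    (v : List (List Bool))
    (h1 : ¬(r < 0 ∨ rows ≤ r ∨ c < 0 ∨ cols ≤ c))
    (h2 : ¬((pvVget v r c || pvAget arr r c == "X") = true)) :
    pvDfs arr rows cols (f+1) r c v =
      ((1 : Int) + (pvDfs arr rows cols f (r+1) c (pvVset v r c)).1
         + (pvDfs arr rows cols f (r-1) c (pvDfs arr rows cols f (r+1) c (pvVset v r c)).2).1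
         + (pvDfs arr rows cols f r (c+1) (pvDfs arr rows cols f (r-1) c
             (pvDfs arr rows cols f (r+1) c (pvVset v r c)).2).2).1
         + (pvDfs arr rows cols f r (c-1) (pvDfs arr rows cols f r (c+1)
             (pvDfs arr rows cols f (r-1) c
               (pvDfs arr rows cols f (r+1) c (pvVset v r c)).2).2).2).1,
       (pvDfs arr rows cols f r (c-1) (pvDfs arr rows cols f r (c+1)
           (pvDfs arr rows cols f (r-1) c
             (pvDfs arr rows cols f (r+1) c (pvVset v r c)).2).2).2).2) := by
  simp only [pvDfs]
  rw [if_neg h1, if_neg h2]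

-- ---- flat-index bridges: B's 1-D seen list is the row-major flattening of A's visited grid ----

theorem pvGetD_append_right (l1 l2 : List Bool) (j : Nat) :
    (l1 ++ l2).getD (l1.length + j) false = l2.getD j false := by
  simp [List.getD, List.getElem?_append_right (Nat.le_add_right l1.length j)]

theorem pvSet_append_right (l1 l2 : List Bool) (j : Nat) :
    (l1 ++ l2).set (l1.length + j) true = l1 ++ l2.set j true := by
  rw [List.set_append_right _ _ (Nat.le_add_right l1.length j)]
  simp

theorem pvFlatGet : ∀ (v : List (List Bool)) (n i j : Nat),
    (∀ row ∈ v, row.length = n) → j < n →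
    v.flatten.getD (i * n + j) false = (v.getD i []).getD j false := by
  intro v
  induction v with
  | nil => intro n i j _ _; simp
  | cons row v ih =>
    intro n i j hrows hj
    have hrow : row.length = n := hrows row (by simp)
    cases i with
    | zero =>
      simp only [List.flatten_cons, Nat.zero_mul, Nat.zero_add, List.getD_cons_zero]
      exact List.getD_append row v.flatten false j (by omega)
    | succ i =>
      have he : (i + 1) * n + j = row.length + (i * n + j) := by rw [hrow]; ring
      rw [List.flatten_cons, he, pvGetD_append_right, List.getD_cons_succ]
      exact ih n i j (fun r hr => hrows r (by simp [hr])) hj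

theorem pvFlatSet : ∀ (v : List (List Bool)) (n i j : Nat),
    (∀ row ∈ v, row.length = n) → i < v.length → j < n →
    (v.set i ((v.getD i []).set j true)).flatten = v.flatten.set (i * n + j) true := by
  intro v
  induction v with
  | nil => intro n i j _ hi _; simp at hi
  | cons row v ih =>
    intro n i j hrows hi hj
    have hrow : row.length = n := hrows row (by simp)
    cases i with
    | zero =>
      simp only [List.getD_cons_zero, List.set_cons_zero, List.flatten_cons,
        Nat.zero_mul, Nat.zero_add]
      rw [List.set_append_left _ _ (by omega)]
    | succ i =>
      have he : (i + 1) * n + j = row.length + (i * n + j) := by rw [hrow]; ring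
      simp only [List.getD_cons_succ, List.set_cons_succ, List.flatten_cons, he,
        pvSet_append_right]
      rw [ih n i j (fun r hr => hrows r (by simp [hr])) (by simpa using hi) hj]

theorem pvIdx_toNat (r c cols : Int) (hr : 0 ≤ r) (hc : 0 ≤ c) (hcols : 0 ≤ cols) :
    (r * cols + c).toNat = r.toNat * cols.toNat + c.toNat := by
  obtain ⟨a, rfl⟩ := Int.eq_ofNat_of_zero_le hr
  obtain ⟨b, rfl⟩ := Int.eq_ofNat_of_zero_le hc
  obtain ⟨m, rfl⟩ := Int.eq_ofNat_of_zero_le hcols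
  have : (a : Int) * (m : Int) + (b : Int) = ((a * m + b : Nat) : Int) := by push_cast; ring
  rw [this]
  exact Int.toNat_natCast _

theorem pvSeenGet_flatten (rows cols : Int) (v : List (List Bool)) (r c : Int)
    (hs : pvShape rows cols v) (hr0 : 0 ≤ r) (hc0 : 0 ≤ c) (hclt : c < cols) :
    pvSeenGet v.flatten (r * cols + c) = pvVget v r c := by
  unfold pvSeenGet pvVget
  rw [pvIdx_toNat r c cols hr0 hc0 (by omega)]
  exact pvFlatGet v cols.toNat r.toNat c.toNat hs.2 (by omega)

theorem pvSeenSet_flatten (rows cols : Int) (v : List (List Bool)) (r c : Int)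
    (hs : pvShape rows cols v) (hr0 : 0 ≤ r) (hrlt : r < rows) (hc0 : 0 ≤ c) (hclt : c < cols) :
    pvSeenSet v.flatten (r * cols + c) = (pvVset v r c).flatten := by
  obtain ⟨hl, hrows⟩ := hs
  unfold pvSeenSet pvVset
  rw [pvIdx_toNat r c cols hr0 hc0 (by omega)]
  exact (pvFlatSet v cols.toNat r.toNat c.toNat hrows (by omega) (by omega)).symm

theorem pvFree_flatten (v : List (List Bool)) : pvFree v.flatten = pvUnvis v := by
  simp [pvFree, pvUnvis, List.count_flatten]

-- ---- one guarded step of A's sequential dfs, in the shape of B's stack discipline ----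

theorem pvSeq_append (arr : List (List String)) (rows cols : Int) :
    ∀ (l1 l2 : List (Int × Int)) (v : List (List Bool)),
      pvSeq arr rows cols (l1 ++ l2) v =
        ((pvSeq arr rows cols l1 v).1 + (pvSeq arr rows cols l2 (pvSeq arr rows cols l1 v).2).1,
         (pvSeq arr rows cols l2 (pvSeq arr rows cols l1 v).2).2) := by
  intro l1
  induction l1 with
  | nil => intro l2 v; simp [pvSeq]
  | cons x l1 ih =>
    obtain ⟨r, c⟩ := x
    intro l2 v
    simp only [List.cons_append, pvSeq, ih]
    exact Prod.ext (by ring) rfl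

theorem pvSeq_step (arr : List (List String)) (rows cols r c : Int) (rest : List (Int × Int))
    (v : List (List Bool)) (hs : pvShape rows cols v)
    (h1 : ¬(r < 0 ∨ rows ≤ r ∨ c < 0 ∨ cols ≤ c))
    (hvg : pvVget v r c = false) (hX : pvAget arr r c ≠ "X") :
    pvSeq arr rows cols ((r, c) :: rest) v =
      (1 + (pvSeq arr rows cols ([(r+1,c),(r-1,c),(r,c+1),(r,c-1)] ++ rest) (pvVset v r c)).1,
       (pvSeq arr rows cols ([(r+1,c),(r-1,c),(r,c+1),(r,c-1)] ++ rest) (pvVset v r c)).2) := by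
  have hb : 0 ≤ r ∧ r < rows ∧ 0 ≤ c ∧ c < cols := by push_neg at h1; omega
  have h2 : ¬((pvVget v r c || pvAget arr r c == "X") = true) := by simp [hvg, hX]
  have hrl := pvInRange_row rows cols v r hs hb.1 hb.2.1
  have hcl := pvInRange_col rows cols v r c hs hb.1 hb.2.1 hb.2.2.1 hb.2.2.2
  have hlt := pvUnvis_vset_lt v r c hrl hcl hvg
  have hs1 := pvShape_vset rows cols v r c hs
  conv_lhs => rw [pvSeq_cons, pvDfs_good arr rows cols (pvUnvis v) r c v h1 h2]
  rw [pvSeq_append]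
  simp only [pvSeq_cons, pvSeq_nil]
  have e1 : pvDfs arr rows cols (pvUnvis v) (r+1) c (pvVset v r c)
      = pvDfs arr rows cols (pvUnvis (pvVset v r c) + 1) (r+1) c (pvVset v r c) :=
    pvDfs_fuel arr rows cols _ _ _ _ _ hs1 (by omega) (by omega)
  rw [e1]
  have hs2 := pvDfs_shape arr rows cols (pvUnvis (pvVset v r c) + 1) (r+1) c _ hs1
  have hu2 := pvDfs_unvis_le arr rows cols (pvUnvis (pvVset v r c) + 1) (r+1) c (pvVset v r c)
  set w2 := (pvDfs arr rows cols (pvUnvis (pvVset v r c) + 1) (r+1) c (pvVset v r c)).2 with hw2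
  have e2 : pvDfs arr rows cols (pvUnvis v) (r-1) c w2
      = pvDfs arr rows cols (pvUnvis w2 + 1) (r-1) c w2 :=
    pvDfs_fuel arr rows cols _ _ _ _ _ hs2 (by omega) (by omega)
  rw [e2]
  have hs3 := pvDfs_shape arr rows cols (pvUnvis w2 + 1) (r-1) c _ hs2
  have hu3 := pvDfs_unvis_le arr rows cols (pvUnvis w2 + 1) (r-1) c w2
  set w3 := (pvDfs arr rows cols (pvUnvis w2 + 1) (r-1) c w2).2 with hw3
  have e3 : pvDfs arr rows cols (pvUnvis v) r (c+1) w3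
      = pvDfs arr rows cols (pvUnvis w3 + 1) r (c+1) w3 :=
    pvDfs_fuel arr rows cols _ _ _ _ _ hs3 (by omega) (by omega)
  rw [e3]
  have hs4 := pvDfs_shape arr rows cols (pvUnvis w3 + 1) r (c+1) _ hs3
  have hu4 := pvDfs_unvis_le arr rows cols (pvUnvis w3 + 1) r (c+1) w3
  set w4 := (pvDfs arr rows cols (pvUnvis w3 + 1) r (c+1) w3).2 with hw4
  have e4 : pvDfs arr rows cols (pvUnvis v) r (c-1) w4
      = pvDfs arr rows cols (pvUnvis w4 + 1) r (c-1) w4 :=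
    pvDfs_fuel arr rows cols _ _ _ _ _ hs4 (by omega) (by omega)
  rw [e4]
  exact Prod.ext (by ring) rfl

-- ---- the stack flood fill over the flat seen list simulates A's sequential dfs ----

theorem pvFill_sim (arr : List (List String)) (rows cols : Int) :
    ∀ (f : Nat) (v : List (List Bool)) (stack : List (Int × Int)), pvShape rows cols v →
      stack.length + 4 * pvUnvis v ≤ f →
      pvFill arr rows cols f v.flatten stack =
        ((pvSeq arr rows cols stack v).1, (pvSeq arr rows cols stack v).2.flatten) := by
  intro f
  induction f with
  | zero =>
    intro v stack hs hlen
    cases stack with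
    | nil => simp [pvFill, pvSeq]
    | cons x rest => rw [List.length_cons] at hlen; omega
  | succ f ih =>
    intro v stack hs hlen
    cases stack with
    | nil => simp [pvFill, pvSeq]
    | cons x rest =>
      obtain ⟨r, c⟩ := x
      rw [List.length_cons] at hlen
      simp only [pvFill]
      split_ifs with hg
      · obtain ⟨hr0, hrlt, hc0, hclt, hsg, hX⟩ := hg
        have hvg : pvVget v r c = false := by
          rw [← pvSeenGet_flatten rows cols v r c hs hr0 hc0 hclt]; exact hsg
        have hX' : pvAget arr r c ≠ "X" := hX
        have hrl := pvInRange_row rows cols v r hs hr0 hrlt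
        have hcl := pvInRange_col rows cols v r c hs hr0 hrlt hc0 hclt
        have hlt := pvUnvis_vset_lt v r c hrl hcl hvg
        have hs1 := pvShape_vset rows cols v r c hs
        rw [pvSeenSet_flatten rows cols v r c hs hr0 hrlt hc0 hclt]
        rw [show ((r+1,c) :: (r-1,c) :: (r,c+1) :: (r,c-1) :: rest)
              = ([(r+1,c),(r-1,c),(r,c+1),(r,c-1)] ++ rest) from rfl]
        rw [ih (pvVset v r c) _ hs1
          (by simp only [List.length_append, List.length_cons, List.length_nil]; omega)]
        rw [pvSeq_step arr rows cols r c rest v hs (by omega) hvg hX']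
      · rw [ih v rest hs (by omega)]
        conv_rhs => rw [pvSeq]
        have hp : pvDfs arr rows cols (pvUnvis v + 1) r c v = (0, v) := by
          rw [pvDfs]
          by_cases hb : r < 0 ∨ rows ≤ r ∨ c < 0 ∨ cols ≤ c
          · rw [if_pos hb]
          · rw [if_neg hb]
            have hcond : (pvVget v r c || pvAget arr r c == "X") = true := by
              by_contra hx
              simp only [Bool.or_eq_true, not_or, Bool.not_eq_true, beq_iff_eq] at hx
              push_neg at hb
              refine hg ⟨by omega, by omega, by omega, by omega, ?_, ?_⟩
              · rw [pvSeenGet_flatten rows cols v r c hs (by omega) (by omega) (by omega)]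
                exact hx.1
              · exact hx.2
            rw [if_pos hcond]
        rw [hp]
        simp

theorem pvMax_eq_ite (a b : Int) : max a b = if b > a then b else a := by
  split_ifs <;> omega

-- B's per-index step simulates A's per-cell step at k = i*cols + j
theorem pvStep_sim (arr : List (List String)) (rows cols i j : Int)
    (st : Int × List (List Bool)) (hs : pvShape rows cols st.2)
    (hi0 : 0 ≤ i) (hilt : i < rows) (hj0 : 0 ≤ j) (hjlt : j < cols) :
    pvStepB arr rows cols (st.1, st.2.flatten) (i * cols + j)
      = ((pvCellA arr rows cols i st j).1, (pvCellA arr rows cols i st j).2.flatten)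
    ∧ pvShape rows cols (pvCellA arr rows cols i st j).2 := by
  have hcpos : (0 : Int) < cols := by omega
  have hdiv : PySem.Int.floordiv (i * cols + j) cols = i := by
    rw [PySem.Int.floordiv_eq_ediv_of_pos hcpos, add_comm,
      Int.add_mul_ediv_right _ _ (by omega), Int.ediv_eq_zero_of_lt hj0 hjlt, zero_add]
  have hmod : PySem.Int.mod (i * cols + j) cols = j := by
    rw [PySem.Int.mod_eq_emod_of_pos hcpos, add_comm, Int.add_mul_emod_self_right,
      Int.emod_eq_of_lt hj0 hjlt]
  unfold pvStepB pvCellA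
  simp only [pvAget, hdiv, hmod,
    pvSeenGet_flatten rows cols st.2 i j hs hi0 hj0 hjlt]
  by_cases hcond : ((arr.getD i.toNat []).getD j.toNat "" == "O" && !pvVget st.2 i j) = true
  · rw [if_pos hcond, if_pos hcond]
    rw [pvFree_flatten]
    rw [pvFill_sim arr rows cols (4 * pvUnvis st.2 + 1) st.2 [(i, j)] hs
      (by simp only [List.length_cons, List.length_nil]; omega)]
    have hseq : pvSeq arr rows cols [(i, j)] st.2
        = ((pvDfs arr rows cols (pvUnvis st.2 + 1) i j st.2).1,
           (pvDfs arr rows cols (pvUnvis st.2 + 1) i j st.2).2) := by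
      simp [pvSeq]
    rw [hseq]
    refine ⟨Prod.ext ((pvMax_eq_ite _ _).symm) rfl, ?_⟩
    exact pvDfs_shape arr rows cols _ i j st.2 hs
  · rw [if_neg hcond, if_neg hcond]
    exact ⟨rfl, hs⟩

-- relational fold: B's flat state stays the flattening of A's grid state
theorem pvFoldl_rel {γ : Type} (rows cols : Int)
    (fA : (Int × List (List Bool)) → γ → Int × List (List Bool))
    (fB : (Int × List Bool) → γ → Int × List Bool) :
    ∀ (l : List γ),
      (∀ (st : Int × List (List Bool)) (x : γ), x ∈ l → pvShape rows cols st.2 →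
        fB (st.1, st.2.flatten) x = ((fA st x).1, (fA st x).2.flatten)
          ∧ pvShape rows cols (fA st x).2) →
      ∀ (st : Int × List (List Bool)), pvShape rows cols st.2 →
        l.foldl fB (st.1, st.2.flatten) = ((l.foldl fA st).1, (l.foldl fA st).2.flatten)
          ∧ pvShape rows cols (l.foldl fA st).2 := by
  intro l
  induction l with
  | nil => intro _ st hs; exact ⟨rfl, hs⟩
  | cons x l ih =>
    intro h st hs
    obtain ⟨he, hsx⟩ := h st x (by simp) hs
    simp only [List.foldl_cons]
    rw [he]
    exact ih (fun st y hy hs' => h st y (by simp [hy]) hs') (fA st x) hsx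

-- B's k-block for row i simulates A's inner row loop
theorem pvRow_sim (arr : List (List String)) (rows cols i : Int)
    (hi0 : 0 ≤ i) (hilt : i < rows) (st : Int × List (List Bool))
    (hs : pvShape rows cols st.2) :
    ((PySem.List.pyRange 0 cols 1).map (fun j => i * cols + j)).foldl
        (pvStepB arr rows cols) (st.1, st.2.flatten)
      = ((pvRowA arr rows cols st i).1, (pvRowA arr rows cols st i).2.flatten)
    ∧ pvShape rows cols (pvRowA arr rows cols st i).2 := by
  rw [List.foldl_map]
  unfold pvRowA
  exact pvFoldl_rel rows cols (pvCellA arr rows cols i)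
    (fun st j => pvStepB arr rows cols st (i * cols + j))
    (PySem.List.pyRange 0 cols 1)
    (fun st j hj hs' => by
      have hb := PySem.List.mem_pyRange_one.mp hj
      exact pvStep_sim arr rows cols i j st hs' hi0 hilt hb.1 hb.2)
    st hs

-- the flat index range is the row-major concatenation of the per-row blocks
theorem pvRange_flat : ∀ (m : Nat) (cols : Int), 0 ≤ cols →
    PySem.List.pyRange 0 ((m : Int) * cols) 1
      = (PySem.List.pyRange 0 (m : Int) 1).flatMap
          (fun i => (PySem.List.pyRange 0 cols 1).map (fun j => i * cols + j)) := by
  intro m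
  induction m with
  | zero =>
    intro cols _
    simp [PySem.List.pyRange_one_eq_nil]
  | succ m ih =>
    intro cols hc
    have hmc : (0 : Int) ≤ (m : Int) * cols := by positivity
    have h1 : ((m + 1 : Nat) : Int) * cols = (m : Int) * cols + cols := by push_cast; ring
    have h2 : ((m + 1 : Nat) : Int) = (m : Int) + 1 := by push_cast; ring
    rw [h1,
      PySem.List.pyRange_one_append 0 ((m : Int) * cols) ((m : Int) * cols + cols) hmc
        (by omega),
      h2, PySem.List.pyRange_one_succ_right (by positivity),
      List.flatMap_append, ih cols hc]
    congr 1
    simp only [List.flatMap_cons, List.flatMap_nil, List.append_nil]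
    rw [PySem.List.pyRange_one, PySem.List.pyRange_one]
    have e : (m : Int) * cols + cols - (m : Int) * cols = cols := by ring
    rw [e, sub_zero, List.map_map]
    congr 1
    funext k
    simp

-- main bridge: the whole flat scan equals the whole nested scan
theorem pvMain (arr : List (List String)) (cols : Int) (m : Nat) (hc0 : 0 ≤ cols) :
    ((PySem.List.pyRange 0 ((m : Int) * cols) 1).foldl (pvStepB arr (m : Int) cols)
      ((0 : Int), List.replicate ((m : Int) * cols).toNat false)).1
    = ((PySem.List.pyRange 0 (m : Int) 1).foldl (pvRowA arr (m : Int) cols)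
      ((0 : Int), List.replicate ((m : Int)).toNat (List.replicate cols.toNat false))).1 := by
  have hr0 : (0 : Int) ≤ (m : Int) := Int.natCast_nonneg m
  have hmul : ((m : Int) * cols).toNat = m * cols.toNat := by
    rw [show (m : Int) * cols = (m : Int) * cols + 0 by ring,
      pvIdx_toNat (m : Int) 0 cols hr0 le_rfl hc0]
    simp
  have hinit : List.replicate ((m : Int) * cols).toNat false
      = (List.replicate ((m : Int)).toNat (List.replicate cols.toNat false)).flatten := by
    rw [hmul, List.flatten_replicate_replicate]
    simp
  have hshape0 : pvShape (m : Int) cols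
      (List.replicate ((m : Int)).toNat (List.replicate cols.toNat false)) := by
    refine ⟨by simp, ?_⟩
    intro row hrow
    rw [List.eq_of_mem_replicate hrow]
    simp
  rw [pvRange_flat m cols hc0, List.foldl_flatMap, hinit]
  have hrel := pvFoldl_rel (m : Int) cols (pvRowA arr (m : Int) cols)
    (fun st i => ((PySem.List.pyRange 0 cols 1).map (fun j => i * cols + j)).foldl
      (pvStepB arr (m : Int) cols) st)
    (PySem.List.pyRange 0 (m : Int) 1)
    (fun st i hi hs => by
      have hb := PySem.List.mem_pyRange_one.mp hi
      exact pvRow_sim arr (m : Int) cols i hb.1 hb.2 st hs)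
    ((0 : Int), List.replicate ((m : Int)).toNat (List.replicate cols.toNat false)) hshape0
  exact congrArg Prod.fst hrel.1

-- ===== VERDICT (by name: the statement is the Claim_ definition above) =====
theorem best_land_spec : Claim_equal_best_land := by
  intro arr _ _
  unfold Spec_best_land best_land best_land_alt
  simp only []
  exact (pvMain arr ((PySem.List.pyGetD arr 0 []).length : Int) arr.length
    (Int.natCast_nonneg _)).symm
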